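-- pv_equiv track=rewrite | github.com/dos-group/load-prediction-dsp | dl_experiments/common.py | update_flat_dicts
-- ===== SOURCE A (Python) =====
-- import copy
--
-- def update_flat_dicts(root: dict, targets: list):
--     my_root = copy.deepcopy(root)
--     my_targets = [copy.deepcopy(target) for target in targets]
--
--     for k, v in my_root.items():
--         for target in my_targets:
--             if k in target:
--                 target[k] = v
--
--     return my_targets
-- ===== SOURCE B (Python) =====
-- import copy
--
-- def update_flat_dicts(root: dict, targets: list):
--     my_root = copy.deepcopy(root)
--     out = []
--     for target in targets:
--         rebuilt = {}
--         for k, v in copy.deepcopy(target).items():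
--             rebuilt[k] = my_root.get(k, v)
--         out.append(rebuilt)
--     return out
-- ===== Notes on version B (the rewrite author's own statement) =====
-- stated objective: alternative
-- what changed: Inverted traversal and decomposition: instead of folding every root key over all targets and mutating matching entries in place, B rebuilds each target in a single pass over its own items, consulting root once per key via dict.get with the original value as default.
import Mathlib
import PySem

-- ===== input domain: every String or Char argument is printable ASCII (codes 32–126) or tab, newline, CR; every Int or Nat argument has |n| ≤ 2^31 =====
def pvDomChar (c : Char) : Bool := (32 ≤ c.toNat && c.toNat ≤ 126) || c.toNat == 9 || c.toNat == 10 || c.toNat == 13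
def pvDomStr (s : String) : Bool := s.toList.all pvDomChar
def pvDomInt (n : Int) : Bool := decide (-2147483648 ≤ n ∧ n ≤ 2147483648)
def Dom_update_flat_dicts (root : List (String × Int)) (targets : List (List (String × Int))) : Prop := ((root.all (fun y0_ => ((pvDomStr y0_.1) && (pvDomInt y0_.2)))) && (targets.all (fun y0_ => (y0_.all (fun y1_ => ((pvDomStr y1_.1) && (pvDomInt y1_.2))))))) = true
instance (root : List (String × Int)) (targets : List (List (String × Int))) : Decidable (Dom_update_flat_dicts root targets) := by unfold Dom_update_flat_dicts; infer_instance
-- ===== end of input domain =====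

-- B rebuilds each target in one pass over its own items (root.get(k, v) as default), instead of
-- folding every root key over every target; return value identical, no observable mutation in A.

-- ===== PORT A =====
-- `target[k] = v` on a dict whose key k is present: overwrite the first (only) matching pair in place
def aSet : List (String × Int) → String → Int → List (String × Int)
  | [], _, _ => []
  | p :: rest, k, v => if p.1 == k then (k, v) :: rest else p :: aSet rest k v

def update_flat_dicts (root : List (String × Int)) (targets : List (List (String × Int))) : List (List (String × Int)) :=
  -- my_root = deepcopy(root); my_targets = [deepcopy(t) for t in targets] (pure values here)
  -- for k, v in my_root.items(): for target in my_targets: if k in target: target[k] = v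
  root.foldl
    (fun ts kv =>
      ts.map (fun target =>
        if target.any (fun p => p.1 == kv.1) then aSet target kv.1 kv.2 else target))
    targets

-- ===== PORT B =====
-- my_root.get(k, d): first match wins (keys are unique in a dict)
def bGet (root : List (String × Int)) (k : String) (d : Int) : Int :=
  (List.lookup k root).getD d

def update_flat_dicts_alt (root : List (String × Int)) (targets : List (List (String × Int))) : List (List (String × Int)) :=
  -- out = []; for target in targets: rebuilt = {}; for k, v in target.items():
  --   rebuilt[k] = my_root.get(k, v); out.append(rebuilt)
  -- (target's keys are distinct, so each assignment appends a fresh entry to rebuilt)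
  targets.foldl
    (fun out target =>
      out ++ [target.foldl (fun rebuilt p => rebuilt ++ [(p.1, bGet root p.1 p.2)]) []])
    []

-- ===== PRECONDITION & SPEC =====
-- Pre_ only demands that the association lists actually represent Python dicts (no duplicate
-- keys); every input the Python A accepts is a dict, so nothing of A's domain is excluded.
def Pre_update_flat_dicts (root : List (String × Int)) (targets : List (List (String × Int))) : Prop :=
  (root.map Prod.fst).Nodup ∧ ∀ t ∈ targets, (t.map Prod.fst).Nodup
instance (root : List (String × Int)) (targets : List (List (String × Int))) : Decidable (Pre_update_flat_dicts root targets) := by unfold Pre_update_flat_dicts; infer_instance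

def pvWitness_update_flat_dicts : (List (String × Int)) × (List (List (String × Int))) :=
  ([("a", 1), ("b", 2)], [[("a", 7), ("c", 3)], [("b", 0)]])

def Spec_update_flat_dicts (root : List (String × Int)) (targets : List (List (String × Int))) (out : List (List (String × Int))) : Prop := out = update_flat_dicts_alt root targets
instance (root : List (String × Int)) (targets : List (List (String × Int))) (out : List (List (String × Int))) : Decidable (Spec_update_flat_dicts root targets out) := by unfold Spec_update_flat_dicts; infer_instance

-- ===== CLAIM (what is proved, stated in full; the proofs are below) =====
def Claim_equal_update_flat_dicts : Prop := ∀ (root : List (String × Int)) (targets : List (List (String × Int))), Dom_update_flat_dicts root targets → Pre_update_flat_dicts root targets → Spec_update_flat_dicts root targets (update_flat_dicts root targets)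

-- ===== LEMMAS AND PROOFS =====
set_option maxRecDepth 4096

-- an append-accumulator fold is a map
theorem foldl_append_map {α β : Type} (f : α → β) (l : List α) (acc : List β) :
    l.foldl (fun a x => a ++ [f x]) acc = acc ++ l.map f := by
  induction l generalizing acc with
  | nil => simp
  | cons x xs ih => simp [ih]

-- the replacement B applies for one root pair
def repl (k : String) (v : Int) (p : String × Int) : String × Int :=
  if p.1 == k then (k, v) else p

theorem repl_keys (k : String) (v : Int) (t : List (String × Int)) :
    (t.map (repl k v)).map Prod.fst = t.map Prod.fst := by
  induction t with
  | nil => rfl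
  | cons p rest ih =>
      simp only [List.map_cons, ih, repl]
      split_ifs with h
      · have hk : p.1 = k := by simpa using h
        simp [hk]
      · rfl

theorem map_repl_of_not_mem (k : String) (v : Int) (t : List (String × Int))
    (h : k ∉ t.map Prod.fst) : t.map (repl k v) = t := by
  induction t with
  | nil => rfl
  | cons p rest ih =>
      simp only [List.map_cons, List.mem_cons, not_or] at h
      simp only [List.map_cons, ih h.2, repl, List.cons.injEq]
      have : ¬ (p.1 == k) = true := fun hb => h.1 (beq_iff_eq.mp hb).symm
      simp [this]

theorem lookup_of_not_mem (k : String) (t : List (String × Int))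
    (h : k ∉ t.map Prod.fst) : List.lookup k t = none := by
  induction t with
  | nil => rfl
  | cons p rest ih =>
      simp only [List.map_cons, List.mem_cons, not_or] at h
      have : ¬ (k == p.1) = true := fun hb => h.1 (beq_iff_eq.mp hb)
      simp [List.lookup, this, ih h.2]

-- A's per-(k,v) step on one target, expressed as B's pointwise replacement
theorem step_eq_map_repl (k : String) (v : Int) (t : List (String × Int))
    (h : (t.map Prod.fst).Nodup) :
    (if t.any (fun p => p.1 == k) then aSet t k v else t) = t.map (repl k v) := by
  induction t with
  | nil => rfl
  | cons p rest ih =>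
      simp only [List.map_cons, List.nodup_cons] at h
      by_cases hpk : (p.1 == k) = true
      · have hk : p.1 = k := by simpa using hpk
        have hnm : k ∉ rest.map Prod.fst := hk ▸ h.1
        simp [aSet, hpk, repl, map_repl_of_not_mem k v rest hnm]
      · have hany : ((p :: rest).any fun p => p.1 == k) = rest.any (fun p => p.1 == k) := by
          simp [hpk]
        have hrepl : repl k v p = p := by simp [repl, hpk]
        rw [hany, List.map_cons, hrepl, ← ih h.2]
        by_cases hrA : (rest.any fun p => p.1 == k) = true
        · rw [if_pos hrA, if_pos hrA]
          simp only [aSet]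
          rw [if_neg hpk]
        · rw [if_neg hrA, if_neg hrA]

-- per-target equivalence: folding all root pairs over one target = B's single pass
theorem foldl_target (root t : List (String × Int))
    (hr : (root.map Prod.fst).Nodup) (ht : (t.map Prod.fst).Nodup) :
    root.foldl (fun t kv => if t.any (fun p => p.1 == kv.1) then aSet t kv.1 kv.2 else t) t
      = t.map (fun p => (p.1, bGet root p.1 p.2)) := by
  induction root generalizing t with
  | nil => simp [bGet]
  | cons kv rest ih =>
      simp only [List.map_cons, List.nodup_cons] at hr
      rw [List.foldl_cons, step_eq_map_repl kv.1 kv.2 t ht,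
        ih (t.map (repl kv.1 kv.2)) hr.2 (by rw [repl_keys]; exact ht), List.map_map]
      apply List.map_congr_left
      intro p _
      simp only [Function.comp, repl, bGet]
      by_cases hpk : (p.1 == kv.1) = true
      · have hk : p.1 = kv.1 := by simpa using hpk
        have : List.lookup kv.1 rest = none := lookup_of_not_mem _ _ hr.1
        simp [List.lookup, hk, this]
      · have hne : ¬ (p.1 == kv.1) = true := hpk
        simp [List.lookup, hne]

-- the outer loop: folding a per-target step through the list of targets commutes with map
theorem foldl_map_commute {α β : Type} (g : β → α → α) (r : List β) (ts : List α) :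
    r.foldl (fun ts kv => ts.map (g kv)) ts
      = ts.map (fun t => r.foldl (fun t kv => g kv t) t) := by
  induction r generalizing ts with
  | nil => simp
  | cons a as ih => rw [List.foldl_cons, ih, List.map_map]; rfl

-- ===== VERDICT (by name: the statement is the Claim_ definition above) =====
theorem update_flat_dicts_spec : Claim_equal_update_flat_dicts := by
  intro root targets _ hpre
  obtain ⟨hr, hts⟩ := hpre
  unfold Spec_update_flat_dicts update_flat_dicts update_flat_dicts_alt
  rw [foldl_map_commute
    (fun kv t => if t.any (fun p => p.1 == kv.1) then aSet t kv.1 kv.2 else t) root targets,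
    foldl_append_map
      (fun target => target.foldl (fun rebuilt p => rebuilt ++ [(p.1, bGet root p.1 p.2)]) [])
      targets []]
  simp only [List.nil_append]
  refine List.map_congr_left (fun t ht => ?_)
  rw [foldl_target root t hr (hts t ht), foldl_append_map, List.nil_append]
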